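-- pv_equiv track=rewrite | github.com/zpiazza-combocurve/multi-language-bazel-monorepo | packages/python/combocurve/combocurve/services/forecast/deterministic_forecast_service.py | _sort_by_rate
-- ===== SOURCE A (Python) =====
-- from typing import Any, Dict, Iterable, List
--
-- def _sort_by_rate(phases: Iterable[str], para_dicts: Dict[str, Any]):
--     """To compute EUR at end, need to make sure rate phases are computed first."""
--     rate_phases = []
--     ratio_phases = []
--     for p in phases:
--         if para_dicts[p]['axis_combo'] == 'rate':
--             rate_phases.append(p)
--         else:
--             ratio_phases.append(p)
--     return rate_phases + ratio_phases
-- ===== SOURCE B (Python) =====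
-- def _sort_by_rate(phases, para_dicts):
--     """To compute EUR at end, need to make sure rate phases are computed first."""
--     return sorted(phases, key=lambda p: para_dicts[p]['axis_combo'] != 'rate')
-- ===== Notes on version B (the rewrite author's own statement) =====
-- stated objective: simpler
-- what changed: Replaces the explicit two-bucket partition loop with a single stable sort on the boolean key axis_combo != 'rate', whose stability reproduces rate-before-ratio order.
import Mathlib
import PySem

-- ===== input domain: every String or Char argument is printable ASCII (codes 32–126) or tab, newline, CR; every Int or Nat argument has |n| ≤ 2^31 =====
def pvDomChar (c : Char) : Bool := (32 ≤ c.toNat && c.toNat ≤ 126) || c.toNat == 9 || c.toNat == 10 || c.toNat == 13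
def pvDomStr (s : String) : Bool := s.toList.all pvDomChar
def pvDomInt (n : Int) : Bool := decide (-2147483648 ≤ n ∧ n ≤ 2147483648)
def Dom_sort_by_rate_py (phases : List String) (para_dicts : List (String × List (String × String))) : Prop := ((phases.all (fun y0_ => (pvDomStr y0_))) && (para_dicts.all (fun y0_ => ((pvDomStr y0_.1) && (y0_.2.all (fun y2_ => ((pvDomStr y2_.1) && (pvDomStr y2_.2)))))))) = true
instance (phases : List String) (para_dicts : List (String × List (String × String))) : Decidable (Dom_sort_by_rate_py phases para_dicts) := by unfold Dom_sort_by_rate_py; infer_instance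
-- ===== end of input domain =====

-- B replaces A's two-bucket partition loop with a single stable sort on the boolean
-- key axis_combo != 'rate' (objective: simpler).

-- shared lookup helper: para_dicts[p]['axis_combo'] (Pre_ guarantees both keys exist,
-- so the defaults are never the result inside Pre_)
def pvAxis (para_dicts : List (String × List (String × String))) (p : String) : String :=
  PySem.Dict.getD (PySem.Dict.mk (PySem.Dict.getD (PySem.Dict.mk para_dicts) p [])) "axis_combo" ""

-- ===== PORT A =====
def sort_by_rate_py (phases : List String) (para_dicts : List (String × List (String × String))) : List String :=
  let st := phases.foldl
    (fun (acc : List String × List String) p =>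
      if pvAxis para_dicts p = "rate" then (acc.1 ++ [p], acc.2) else (acc.1, acc.2 ++ [p]))
    ([], [])
  st.1 ++ st.2

-- ===== PORT B =====
def sort_by_rate_py_alt (phases : List String) (para_dicts : List (String × List (String × String))) : List String :=
  PySem.List.sorted phases (fun p => pvAxis para_dicts p != "rate") false

-- ===== PRECONDITION & SPEC =====
-- Pre_ excludes exactly the inputs where Python A raises KeyError: a phase absent
-- from para_dicts, or its dict lacking the 'axis_combo' key.
def Pre_sort_by_rate_py (phases : List String) (para_dicts : List (String × List (String × String))) : Prop :=
  ∀ p ∈ phases, (PySem.Dict.get? (PySem.Dict.mk para_dicts) p).isSome = true ∧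
    (PySem.Dict.get? (PySem.Dict.mk ((PySem.Dict.get? (PySem.Dict.mk para_dicts) p).getD [])) "axis_combo").isSome = true
instance (phases : List String) (para_dicts : List (String × List (String × String))) : Decidable (Pre_sort_by_rate_py phases para_dicts) := by unfold Pre_sort_by_rate_py; infer_instance

def pvWitness_sort_by_rate_py : List String × (List (String × List (String × String))) :=
  (["oil", "gas"], [("oil", [("axis_combo", "ratio")]), ("gas", [("axis_combo", "rate")])])

def Spec_sort_by_rate_py (phases : List String) (para_dicts : List (String × List (String × String))) (out : List String) : Prop := out = sort_by_rate_py_alt phases para_dicts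
instance (phases : List String) (para_dicts : List (String × List (String × String))) (out : List String) : Decidable (Spec_sort_by_rate_py phases para_dicts out) := by unfold Spec_sort_by_rate_py; infer_instance

-- ===== CLAIM (what is proved, stated in full; the proofs are below) =====
def Claim_equal_sort_by_rate_py : Prop := ∀ (phases : List String) (para_dicts : List (String × List (String × String))), Dom_sort_by_rate_py phases para_dicts → Pre_sort_by_rate_py phases para_dicts → Spec_sort_by_rate_py phases para_dicts (sort_by_rate_py phases para_dicts)

-- ===== LEMMAS AND PROOFS =====

-- A's partition loop accumulates the two filters of the input.
theorem pv_foldl_partition {α : Type} (P : α → Prop) [DecidablePred P] :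
    ∀ (xs : List α) (r t : List α),
      xs.foldl (fun (acc : List α × List α) p =>
          if P p then (acc.1 ++ [p], acc.2) else (acc.1, acc.2 ++ [p])) (r, t)
        = (r ++ xs.filter (fun p => decide (P p)), t ++ xs.filter (fun p => !decide (P p))) := by
  intro xs
  induction xs with
  | nil => intro r t; simp
  | cons x xs ih =>
    intro r t
    by_cases h : P x <;> simp [List.foldl_cons, h, ih]

-- inserting a false-key element: it lands between the false group and the true group
theorem pv_insertBy_false {α : Type} (key : α → Bool) (x : α) (hx : key x = false) :
    ∀ (as bs : List α), (∀ a ∈ as, key a = false) → (∀ b ∈ bs, key b = true) →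
      PySem.List.insertBy (fun a b => decide (key a < key b)) x (as ++ bs) = (as ++ [x]) ++ bs := by
  intro as
  induction as with
  | nil =>
    intro bs _ hb
    cases bs with
    | nil => simp [PySem.List.insertBy]
    | cons b bs' =>
      have : key b = true := hb b (by simp)
      simp [PySem.List.insertBy, hx, this]
  | cons a as' ih =>
    intro bs ha hb
    have hka : key a = false := ha a (by simp)
    have := ih bs (fun a' h => ha a' (by simp [h])) hb
    simp [PySem.List.insertBy, hx, hka, this]

-- inserting a true-key element: never before anything, so it goes to the very end
theorem pv_insertBy_true {α : Type} (key : α → Bool) (x : α) (hx : key x = true) :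
    ∀ (ys : List α),
      PySem.List.insertBy (fun a b => decide (key a < key b)) x ys = ys ++ [x] := by
  intro ys
  induction ys with
  | nil => simp [PySem.List.insertBy]
  | cons y ys' ih => simp [PySem.List.insertBy, hx, ih]

-- the stable insertion sort with a boolean key is the false-filter followed by the true-filter
theorem pv_foldl_insertBy_bool {α : Type} (key : α → Bool) :
    ∀ (xs as bs : List α), (∀ a ∈ as, key a = false) → (∀ b ∈ bs, key b = true) →
      xs.foldl (fun acc x => PySem.List.insertBy (fun a b => decide (key a < key b)) x acc) (as ++ bs)
        = (as ++ xs.filter (fun x => !key x)) ++ (bs ++ xs.filter key) := by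
  intro xs
  induction xs with
  | nil => intro as bs _ _; simp
  | cons x xs' ih =>
    intro as bs ha hb
    by_cases h : key x = true
    · have h1 := pv_insertBy_true key x h (as ++ bs)
      have h2 : as ++ bs ++ [x] = as ++ (bs ++ [x]) := by simp
      have h3 := ih as (bs ++ [x]) ha (by intro b hbm; rcases List.mem_append.1 hbm with hb' | hb'
                                          · exact hb b hb'
                                          · simp at hb'; simpa [hb'])
      simp only [List.foldl_cons, h1, h2, h3, List.filter_cons, h]
      simp
    · have hx : key x = false := by simpa using h
      have h1 := pv_insertBy_false key x hx as bs ha hb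
      have h3 := ih (as ++ [x]) bs (by intro a ham; rcases List.mem_append.1 ham with ha' | ha'
                                       · exact ha a ha'
                                       · simp at ha'; simpa [ha']) hb
      simp only [List.foldl_cons, h1, h3, List.filter_cons, hx]
      simp

theorem pv_sorted_bool {α : Type} (xs : List α) (key : α → Bool) :
    PySem.List.sorted xs key false = xs.filter (fun x => !key x) ++ xs.filter key := by
  have := pv_foldl_insertBy_bool key xs [] [] (by simp) (by simp)
  simpa [PySem.List.sorted_eq_foldl_insertBy] using this

-- ===== VERDICT (by name: the statement is the Claim_ definition above) =====
theorem sort_by_rate_py_spec : Claim_equal_sort_by_rate_py := by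
  intro phases para_dicts _ _
  unfold Spec_sort_by_rate_py sort_by_rate_py sort_by_rate_py_alt
  rw [pv_foldl_partition (fun p => pvAxis para_dicts p = "rate") phases [] [],
      pv_sorted_bool phases (fun p => pvAxis para_dicts p != "rate")]
  simp only [List.nil_append]
  congr 1 <;> apply List.filter_congr <;> intro p _ <;>
    by_cases h : pvAxis para_dicts p = "rate" <;> simp [h]
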